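-- pv_equiv track=rewrite | github.com/nncsang/Forensics-Tools | ProcessComparator.py | hex_pp
-- ===== SOURCE A (Python) =====
-- FILTER = ''.join([(len(repr(chr(x))) == 3) and chr(x) or '.' for x in range(256)])
--
-- def hex_pp(src, length=8):
--     N = 0
--     result = ''
--     while src:
--         s, src = src[:length], src[length:]
--         hexa = ' '.join(["%02X" % ord(x) for x in s])
--         s = s.translate(FILTER)
--         result += "%04X %-*s %s\n" % (N, length * 3, hexa, s)
--         N += length
--     return result
-- ===== SOURCE B (Python) =====
-- FILTER = ''.join([(len(repr(chr(x))) == 3) and chr(x) or '.' for x in range(256)])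
--
-- def hex_pp(src, length=8):
--     if not src:
--         return ''
--     # one global conversion pass, then a separate row-assembly pass over offsets
--     hexes = ["%02X" % ord(x) for x in src]
--     ascii_all = src.translate(FILTER)
--     rows = []
--     for i in range(0, len(src), length):
--         hexfield = ' '.join(hexes[i:i + length])
--         rows.append("%04X %-*s %s\n" % (i, length * 3, hexfield, ascii_all[i:i + length]))
--     return ''.join(rows)
-- ===== Notes on version B (the rewrite author's own statement) =====
-- stated objective: alternative
-- what changed: B separates conversion from layout: one global pass builds the per-char hex list and the fully translated ascii string, then a second pass over offsets range(0, len, length) slices them into rows, instead of A's single while-loop that repeatedly re-slices the shrinking source and interleaves conversion with formatting per chunk.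
-- outside the precondition, e.g. on hex_pp('ab', 0): A does not finish within the time limit, B raises ValueError; on hex_pp('ab', -1): A does not finish within the time limit, B returns ''
import Mathlib
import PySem

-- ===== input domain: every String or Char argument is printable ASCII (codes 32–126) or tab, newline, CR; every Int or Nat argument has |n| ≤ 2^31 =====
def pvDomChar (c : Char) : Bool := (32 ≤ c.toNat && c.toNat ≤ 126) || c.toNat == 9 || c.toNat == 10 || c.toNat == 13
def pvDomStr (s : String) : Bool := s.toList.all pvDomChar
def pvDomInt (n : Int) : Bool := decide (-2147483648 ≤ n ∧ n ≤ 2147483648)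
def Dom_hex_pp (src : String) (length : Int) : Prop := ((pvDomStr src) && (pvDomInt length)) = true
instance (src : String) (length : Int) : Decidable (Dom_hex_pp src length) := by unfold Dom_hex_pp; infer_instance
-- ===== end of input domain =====

-- B separates conversion (hex list + translated ascii, one global pass) from row layout
-- (a second pass over offsets), instead of A's single loop that re-slices the shrinking
-- source and interleaves conversion with formatting per chunk.

-- shared formatting helpers (ports of the %-format primitives, exact on the ASCII domain)
def hexDigit (n : Nat) : Char := if n < 10 then Char.ofNat (48 + n) else Char.ofNat (55 + n)

-- uppercase hex digits of n, most significant first (no padding)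
def natHexDigits (n : Nat) : List Char :=
  if h : n < 16 then [hexDigit n]
  else natHexDigits (n / 16) ++ [hexDigit (n % 16)]
decreasing_by exact Nat.div_lt_self (by omega) (by omega)

-- "%0*X" % (w, n)
def hexPad (w n : Nat) : String :=
  let ds := natHexDigits n
  String.mk (List.replicate (w - ds.length) '0' ++ ds)

-- "%-*s" % (w, s)
def ljust (w : Nat) (s : String) : String :=
  s ++ String.mk (List.replicate (w - s.toList.length) ' ')

-- s.translate(FILTER) per character; exact on the domain's ASCII chars (codes 9/10/13/32..126):
-- FILTER keeps printable ASCII except backslash, everything else becomes '.'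
def filtChar (c : Char) : Char :=
  if c.toNat = 92 then '.'
  else if 32 ≤ c.toNat ∧ c.toNat ≤ 126 then c else '.'

-- ===== PORT A =====
-- the while-loop of A; the `len ≤ 0` guard only makes the function total
-- (Python diverges there; those inputs are outside Pre_)
def hexA_go (l : List Char) (len : Int) (N : Nat) : String :=
  if hl : l = [] then ""
  else if hlen : len ≤ 0 then ""
  else
    let s := l.take len.toNat
    let rest := l.drop len.toNat
    let hexa := String.intercalate " " (s.map (fun c => hexPad 2 c.toNat))
    let asc := String.mk (s.map filtChar)
    hexPad 4 N ++ " " ++ ljust (len * 3).toNat hexa ++ " " ++ asc ++ "\n"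
      ++ hexA_go rest len (N + len.toNat)
termination_by l.length
decreasing_by
  have h1 : 1 ≤ len.toNat := by omega
  have h2 : 0 < l.length := List.length_pos_iff.mpr hl
  simp [List.length_drop]; omega

def hex_pp (src : String) (length : Int) : String :=
  hexA_go src.toList length 0

-- ===== PORT B =====
def hexB_row (hexes : List String) (asciiAll : List Char) (len : Int) (i : Int) : String :=
  hexPad 4 i.toNat ++ " "
    ++ ljust (len * 3).toNat
        (String.intercalate " " (PySem.List.slice hexes (some i) (some (i + len))))
    ++ " " ++ String.mk (PySem.List.slice asciiAll (some i) (some (i + len))) ++ "\n"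

def hex_pp_alt (src : String) (length : Int) : String :=
  let cs := src.toList
  if cs = [] then "" else
  let hexes := cs.map (fun c => hexPad 2 c.toNat)
  let asciiAll := cs.map filtChar
  let rows := (PySem.List.pyRange 0 cs.length length).map (hexB_row hexes asciiAll length)
  String.join rows

-- ===== PRECONDITION & SPEC =====
-- Pre_ excludes length ≤ 0 with nonempty src: there A's loop makes no progress and diverges.
def Pre_hex_pp (src : String) (length : Int) : Prop := 1 ≤ length ∨ src.toList = []
instance (src : String) (length : Int) : Decidable (Pre_hex_pp src length) := by
  unfold Pre_hex_pp; infer_instance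

def pvWitness_hex_pp : String × Int := ("ab", 1)

def Spec_hex_pp (src : String) (length : Int) (out : String) : Prop := out = hex_pp_alt src length
instance (src : String) (length : Int) (out : String) : Decidable (Spec_hex_pp src length out) := by
  unfold Spec_hex_pp; infer_instance

-- ===== CLAIM (what is proved, stated in full; the proofs are below) =====
def Claim_equal_hex_pp : Prop := ∀ (src : String) (length : Int),
  Dom_hex_pp src length → Pre_hex_pp src length → Spec_hex_pp src length (hex_pp src length)

-- ===== LEMMAS AND PROOFS =====

theorem pyRange_pos_nil (a b s : Int) (hs : 0 < s) (h : b ≤ a) :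
    PySem.List.pyRange a b s = [] := by
  rw [PySem.List.pyRange_of_pos _ _ hs]
  simp [show ¬ a < b by omega]

theorem pyRange_pos_cons (a b s : Int) (hs : 0 < s) (hab : a < b) :
    PySem.List.pyRange a b s = a :: PySem.List.pyRange (a + s) b s := by
  rw [PySem.List.pyRange_of_pos _ _ hs, PySem.List.pyRange_of_pos _ _ hs]
  have hne : s ≠ 0 := by omega
  have hsplit : b - a + s - 1 = (b - (a + s) + s - 1) + 1 * s := by ring
  have hdiv : (b - a + s - 1) / s = (b - (a + s) + s - 1) / s + 1 := by
    rw [hsplit, Int.add_mul_ediv_right _ _ hne]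
  have hnn : 0 ≤ (b - (a + s) + s - 1) / s := by
    apply Int.ediv_nonneg <;> omega
  have hcount : ((b - a + s - 1) / s).toNat = ((b - (a + s) + s - 1) / s).toNat + 1 := by omega
  by_cases h2 : a + s < b
  · simp only [if_pos hab, if_pos h2, hcount, List.range_succ_eq_map, List.map_cons,
      List.map_map]
    congr 1
    · simp
    · apply List.map_congr_left
      intro k _
      simp [Function.comp]
      push_cast
      ring
  · have hz : b - (a + s) + s - 1 < s := by omega
    have : (b - (a + s) + s - 1) / s = 0 := by
      apply Int.ediv_eq_zero_of_lt <;> omega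
    simp only [if_pos hab, if_neg h2, hcount, this]
    simp

theorem slice_chunk {α : Type} (xs : List α) (i : Nat) (len : Int) (hlen : 0 < len) :
    PySem.List.slice xs (some (i : Int)) (some ((i : Int) + len))
      = (xs.drop i).take len.toNat := by
  rw [PySem.List.slice_toNat xs (by omega) (by omega)]
  congr 1
  omega

theorem join_foldl_shift (l : List String) :
    ∀ s : String, List.foldl (· ++ ·) s l = s ++ List.foldl (· ++ ·) "" l := by
  induction l with
  | nil => intro s; simp
  | cons a l ih =>
    intro s
    simp only [List.foldl_cons]
    rw [ih (s ++ a), ih ("" ++ a)]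
    simp [String.append_assoc]

theorem join_cons (s : String) (l : List String) :
    String.join (s :: l) = s ++ String.join l := by
  simp only [String.join, List.foldl_cons]
  rw [join_foldl_shift l ("" ++ s)]
  simp

theorem hexA_go_eq_rows (cs : List Char) (len : Int) (hlen : 1 ≤ len) :
    ∀ (k i : Nat), cs.length - i ≤ k →
      hexA_go (cs.drop i) len i
        = String.join ((PySem.List.pyRange (i : Int) (cs.length : Int) len).map
            (hexB_row (cs.map (fun c => hexPad 2 c.toNat)) (cs.map filtChar) len)) := by
  intro k
  induction k with
  | zero =>
    intro i hi
    have hge : cs.length ≤ i := by omega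
    rw [List.drop_eq_nil_of_le hge, pyRange_pos_nil _ _ _ (by omega) (by exact_mod_cast hge)]
    simp [hexA_go, String.join]
  | succ k ih =>
    intro i hi
    by_cases hcase : cs.length ≤ i
    · rw [List.drop_eq_nil_of_le hcase,
        pyRange_pos_nil _ _ _ (by omega) (by exact_mod_cast hcase)]
      simp [hexA_go, String.join]
    · have hlt : i < cs.length := by omega
      have hlt' : (i : Int) < (cs.length : Int) := by exact_mod_cast hlt
      have hne : cs.drop i ≠ [] := by
        simp only [ne_eq, List.drop_eq_nil_iff]
        omega
      rw [pyRange_pos_cons _ _ _ (by omega) hlt', List.map_cons, join_cons]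
      rw [hexA_go]
      rw [dif_neg hne, dif_neg (show ¬ len ≤ 0 by omega)]
      dsimp only
      have hdrop : (cs.drop i).drop len.toNat = cs.drop (i + len.toNat) := by
        rw [List.drop_drop]
      have hcast : (i : Int) + len = ((i + len.toNat : Nat) : Int) := by
        push_cast; omega
      have hrec : hexA_go (List.drop len.toNat (List.drop i cs)) len (i + len.toNat)
          = String.join ((PySem.List.pyRange ((i : Int) + len) (cs.length : Int) len).map
              (hexB_row (cs.map (fun c => hexPad 2 c.toNat)) (cs.map filtChar) len)) := by
        rw [hdrop, hcast]
        exact ih (i + len.toNat) (by omega)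
      rw [hrec]
      simp only [hexB_row, Int.toNat_natCast,
        slice_chunk _ i len (by omega),
        ← List.map_drop, ← List.map_take]

-- ===== VERDICT (by name: the statement is the Claim_ definition above) =====
theorem hex_pp_spec : Claim_equal_hex_pp := by
  intro src length _hDom hPre
  simp only [Spec_hex_pp, hex_pp, hex_pp_alt]
  rcases eq_or_ne src.toList [] with hcs | hcs
  · simp [hexA_go, hcs]
  · have h1 : 1 ≤ length := hPre.resolve_right hcs
    have hmain := hexA_go_eq_rows src.toList length h1 src.toList.length 0 (by omega)
    rw [if_neg hcs]
    simpa using hmain
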